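-- pv_equiv track=rewrite | github.com/Ortiz-Sebastian/resume-tool | backend/app/services/ats_view_generator.py | _has_repeating_content
-- ===== SOURCE A (Python) =====
-- from typing import Dict, Any, List, Tuple
--
-- def _has_repeating_content(texts: List[str]) -> bool:
--     """Check if any content repeats in the list (appears 2+ times)"""
--     if len(texts) < 2:
--         return False
--
--     # Count occurrences
--     from collections import Counter
--     counts = Counter(texts)
--
--     # If any text appears on 2+ pages, it's likely a header/footer
--     for text, count in counts.items():
--         if text and count >= 2:
--             return True
--
--     return False
-- ===== SOURCE B (Python) =====
-- def _has_repeating_content(texts):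
--     """Check if any content repeats in the list (appears 2+ times)"""
--     seen = set()
--     for t in texts:
--         if not t:
--             continue
--         if t in seen:
--             return True
--         seen.add(t)
--     return False
-- ===== Notes on version B (the rewrite author's own statement) =====
-- stated objective: alternative
-- what changed: Replaces the two-phase Counter-build-then-scan-items with a single pass maintaining a seen-set that short-circuits and returns True at the first repeated non-empty text.
import Mathlib
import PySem

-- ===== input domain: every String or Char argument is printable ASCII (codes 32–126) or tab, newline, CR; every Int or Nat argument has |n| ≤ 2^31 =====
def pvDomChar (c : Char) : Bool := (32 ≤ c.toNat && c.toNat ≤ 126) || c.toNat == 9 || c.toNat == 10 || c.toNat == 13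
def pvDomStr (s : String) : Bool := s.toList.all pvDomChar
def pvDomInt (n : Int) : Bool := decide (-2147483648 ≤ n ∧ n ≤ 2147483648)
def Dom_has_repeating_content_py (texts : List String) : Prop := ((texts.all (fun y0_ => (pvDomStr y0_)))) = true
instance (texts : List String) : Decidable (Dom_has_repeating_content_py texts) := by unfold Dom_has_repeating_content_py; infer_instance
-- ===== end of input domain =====

-- B replaces A's Counter-build-then-scan-items with one pass over a seen-set that returns at the first repeated non-empty text (alternative decomposition, same cost).

-- ===== PORT A =====
def has_repeating_content_py (texts : List String) : Bool :=
  if texts.length < 2 then false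
  else
    -- counts = Counter(texts); for text, count in counts.items(): if text and count >= 2: return True; return False
    let counts : PySem.Dict String Int := PySem.Dict.counter texts
    counts.items.any (fun p => p.1 ≠ "" && p.2 ≥ 2)

-- ===== PORT B =====
-- single pass with a seen-set, early exit on the first repeat
def hrcLoop (seen : PySem.Set String) : List String → Bool
  | [] => false
  | t :: ts =>
      if t = "" then hrcLoop seen ts
      else if PySem.Set.contains seen t then true
      else hrcLoop (PySem.Set.add seen t) ts

def has_repeating_content_py_alt (texts : List String) : Bool :=
  hrcLoop PySem.Set.empty texts

-- ===== PRECONDITION & SPEC =====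
def Spec_has_repeating_content_py (texts : List String) (out : Bool) : Prop := out = has_repeating_content_py_alt texts
instance (texts : List String) (out : Bool) : Decidable (Spec_has_repeating_content_py texts out) := by unfold Spec_has_repeating_content_py; infer_instance

-- ===== CLAIM (what is proved, stated in full; the proofs are below) =====
def Claim_equal_has_repeating_content_py : Prop := ∀ (texts : List String), Dom_has_repeating_content_py texts → Spec_has_repeating_content_py texts (has_repeating_content_py texts)

-- ===== LEMMAS AND PROOFS =====

theorem hrcLoop_cons (seen : PySem.Set String) (t : String) (ts : List String) :
    hrcLoop seen (t :: ts) =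
      if t = "" then hrcLoop seen ts
      else if PySem.Set.contains seen t then true
      else hrcLoop (PySem.Set.add seen t) ts := rfl

-- characterisation of A's result
theorem A_char (texts : List String) :
    has_repeating_content_py texts = decide (∃ u ∈ texts, u ≠ "" ∧ 2 ≤ texts.count u) := by
  unfold has_repeating_content_py
  split
  · rename_i h
    symm
    simp only [decide_eq_false_iff_not]
    rintro ⟨u, hu, -, hc⟩
    have := List.count_le_length (l := texts) (a := u)
    omega
  · simp only [PySem.Dict.items_counter, List.any_map]
    rw [Bool.eq_iff_iff]
    simp only [List.any_eq_true, PySem.Set.mem_ofList, Function.comp_apply, Bool.and_eq_true,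
      decide_eq_true_eq, ge_iff_le, ne_eq]
    constructor
    · rintro ⟨u, hu, hne, hc⟩
      exact ⟨u, hu, hne, by exact_mod_cast hc⟩
    · rintro ⟨u, hu, hne, hc⟩
      exact ⟨u, hu, hne, by exact_mod_cast hc⟩

-- loop invariant characterising B's seen-set loop
theorem hrcLoop_char (ts : List String) : ∀ (seen : PySem.Set String),
    hrcLoop seen ts = decide (∃ u ∈ ts, u ≠ "" ∧ (u ∈ seen ∨ 2 ≤ ts.count u)) := by
  induction ts with
  | nil => intro seen; simp [hrcLoop]
  | cons t ts ih =>
    intro seen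
    rw [hrcLoop_cons]
    by_cases ht : t = ""
    · subst ht
      rw [if_pos rfl, ih seen, Bool.eq_iff_iff]
      simp only [decide_eq_true_eq, List.mem_cons, List.count_cons, beq_iff_eq]
      constructor
      · rintro ⟨u, hu, hne, hc⟩
        refine ⟨u, .inr hu, hne, ?_⟩
        rcases hc with h | h
        · exact .inl h
        · exact .inr (by rw [if_neg (fun e => hne e.symm)]; omega)
      · rintro ⟨u, hu, hne, hc⟩
        rcases hu with rfl | hu
        · exact absurd rfl hne
        refine ⟨u, hu, hne, ?_⟩
        rcases hc with h | h
        · exact .inl h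
        · rw [if_neg (fun e => hne e.symm)] at h
          exact .inr (by omega)
    · rw [if_neg ht]
      by_cases hs : t ∈ seen
      · rw [if_pos (by simpa [PySem.Set.contains] using hs)]
        symm
        simp only [decide_eq_true_eq]
        exact ⟨t, List.mem_cons_self, ht, .inl hs⟩
      · rw [if_neg (by simpa [PySem.Set.contains] using hs), ih, Bool.eq_iff_iff]
        simp only [decide_eq_true_eq, List.mem_cons, PySem.Set.mem_add, List.count_cons, beq_iff_eq]
        constructor
        · rintro ⟨u, hu, hne, hc⟩
          rcases hc with (h | rfl) | h
          · exact ⟨u, .inr hu, hne, .inl h⟩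
          · refine ⟨u, .inl rfl, hne, .inr ?_⟩
            have h1 : 0 < ts.count u := List.count_pos_iff.mpr hu
            rw [if_pos rfl]; omega
          · refine ⟨u, .inr hu, hne, .inr ?_⟩
            split <;> omega
        · rintro ⟨u, hu, hne, hc⟩
          rcases hu with rfl | hu
          · rcases hc with h | h
            · exact absurd h hs
            · rw [if_pos rfl] at h
              have hmem : u ∈ ts := List.count_pos_iff.mp (by omega)
              exact ⟨u, hmem, hne, .inl (.inr rfl)⟩
          · by_cases hut : u = t
            · subst hut
              exact ⟨u, hu, hne, .inl (.inr rfl)⟩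
            · refine ⟨u, hu, hne, ?_⟩
              rcases hc with h | h
              · exact .inl (.inl h)
              · rw [if_neg (fun e => hut e.symm)] at h
                exact .inr (by omega)

theorem B_char (texts : List String) :
    has_repeating_content_py_alt texts = decide (∃ u ∈ texts, u ≠ "" ∧ 2 ≤ texts.count u) := by
  unfold has_repeating_content_py_alt
  rw [hrcLoop_char, Bool.eq_iff_iff]
  simp only [decide_eq_true_eq]
  constructor
  · rintro ⟨u, hu, hne, hc⟩
    rcases hc with h | h
    · exact absurd h (by simp [PySem.Set.empty])
    · exact ⟨u, hu, hne, h⟩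
  · rintro ⟨u, hu, hne, hc⟩
    exact ⟨u, hu, hne, .inr hc⟩

-- ===== VERDICT (by name: the statement is the Claim_ definition above) =====
theorem has_repeating_content_py_spec : Claim_equal_has_repeating_content_py := by
  intro texts _
  unfold Spec_has_repeating_content_py
  rw [A_char, B_char]
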